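-- pv_equiv track=rewrite | github.com/oliverkal/programovani1 | AdventOfCode1.a.py | min_val
-- ===== SOURCE A (Python) =====
-- def min_val(left_list, right_list, distances):
--     min_val1 = min(left_list)
--     min_val2 = min(right_list)
--     distance = abs(min_val1 - min_val2)
--
--     distances.append(distance)
--     #return distances
--
--     left_list.pop(left_list.index(min_val1))
--     right_list.pop(right_list.index(min_val2))
--     #return distances, left_list, right_list
--
--     if len(left_list) and len(right_list) != 0:
--         min_val(left_list, right_list, distances)
--         #distances.append(distance)
--     return distances
-- ===== SOURCE B (Python) =====
-- def min_val(left_list, right_list, distances):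
--     # NOTE: unlike A, this does not mutate left_list/right_list; return value is identical.
--     n = min(len(left_list), len(right_list))
--     ls = sorted(left_list)
--     rs = sorted(right_list)
--     distances.extend(abs(a - b) for a, b in zip(ls[:n], rs[:n]))
--     return distances
-- ===== Notes on version B (the rewrite author's own statement) =====
-- stated objective: faster
-- what changed: Replaces the recursive repeated min/index/pop passes with a single sort of each list and one zip over the first min(len) ranks.
import Mathlib
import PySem

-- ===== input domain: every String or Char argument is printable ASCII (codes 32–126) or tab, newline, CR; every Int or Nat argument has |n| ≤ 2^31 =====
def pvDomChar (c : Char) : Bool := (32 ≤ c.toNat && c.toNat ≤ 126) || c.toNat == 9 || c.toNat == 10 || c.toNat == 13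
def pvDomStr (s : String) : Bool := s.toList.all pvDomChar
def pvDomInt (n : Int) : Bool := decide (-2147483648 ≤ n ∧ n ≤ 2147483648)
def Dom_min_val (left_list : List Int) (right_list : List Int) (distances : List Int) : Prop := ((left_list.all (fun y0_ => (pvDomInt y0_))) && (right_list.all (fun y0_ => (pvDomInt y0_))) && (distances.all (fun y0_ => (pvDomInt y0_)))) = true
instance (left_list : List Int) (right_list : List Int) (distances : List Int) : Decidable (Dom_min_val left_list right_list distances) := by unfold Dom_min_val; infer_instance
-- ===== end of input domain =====

-- B replaces A's recursive min/index/pop passes (quadratic, each pass rescans both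
-- lists) by sorting each list once and zipping the first min(len) ranks (O(n log n)).
-- A mutates left_list/right_list (it empties the shorter one) and appends to
-- distances; B does not mutate left_list/right_list — the equivalence proved here is
-- about the RETURN value only (B appends the same elements to distances).

-- ===== PORT A =====
-- literal transliteration: min(list) = PySem.List.min? (first minimal element);
-- left_list.pop(left_list.index(m)) removes the first occurrence of m = List.erase
-- (PySem.List.remove?_eq_some_erase); 'if len(l) and len(r) != 0' = both nonempty.
def min_val (left_list : List Int) (right_list : List Int) (distances : List Int) : List Int :=
  match h1 : PySem.List.min? left_list (fun x => x), h2 : PySem.List.min? right_list (fun x => x) with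
  | some m1, some m2 =>
    let distances' := distances ++ [|m1 - m2|]
    let left' := left_list.erase m1
    let right' := right_list.erase m2
    if left' ≠ [] ∧ right' ≠ [] then min_val left' right' distances' else distances'
  | _, _ => distances   -- unreachable under Pre_ (Python raises ValueError on an empty list)
termination_by left_list.length
decreasing_by
  have hm := PySem.List.min?_mem h1
  have h := List.length_erase_of_mem hm
  have hp := List.length_pos_of_mem hm
  omega

-- ===== PORT B =====
def min_val_alt (left_list : List Int) (right_list : List Int) (distances : List Int) : List Int :=
  let n := min left_list.length right_list.length
  let ls := PySem.List.sorted left_list (fun x => x) false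
  let rs := PySem.List.sorted right_list (fun x => x) false
  distances ++ List.zipWith (fun a b => |a - b|) (ls.take n) (rs.take n)

-- ===== PRECONDITION & SPEC =====
-- Pre_ excludes exactly the inputs where Python A raises: min() of an empty list is a ValueError.
def Pre_min_val (left_list : List Int) (right_list : List Int) (distances : List Int) : Prop :=
  left_list ≠ [] ∧ right_list ≠ []
instance (left_list : List Int) (right_list : List Int) (distances : List Int) : Decidable (Pre_min_val left_list right_list distances) := by unfold Pre_min_val; infer_instance
def pvWitness_min_val : List Int × List Int × List Int := ([3, 1, 2], [4, 0], [7])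

def Spec_min_val (left_list : List Int) (right_list : List Int) (distances : List Int) (out : List Int) : Prop := out = min_val_alt left_list right_list distances
instance (left_list : List Int) (right_list : List Int) (distances : List Int) (out : List Int) : Decidable (Spec_min_val left_list right_list distances out) := by unfold Spec_min_val; infer_instance

-- ===== CLAIM (what is proved, stated in full; the proofs are below) =====
def Claim_equal_min_val : Prop := ∀ (left_list : List Int) (right_list : List Int) (distances : List Int), Dom_min_val left_list right_list distances → Pre_min_val left_list right_list distances → Spec_min_val left_list right_list distances (min_val left_list right_list distances)

-- ===== LEMMAS AND PROOFS =====

-- sorted(l) decomposes as the minimum followed by sorted(l minus that minimum)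
theorem sorted_min_cons (l : List Int) (m : Int)
    (h : PySem.List.min? l (fun x => x) = some m) :
    PySem.List.sorted l (fun x => x) false = m :: PySem.List.sorted (l.erase m) (fun x => x) false := by
  apply PySem.List.sorted_id_eq_of_perm_of_pairwise
  · have p1 : (m :: PySem.List.sorted (l.erase m) (fun x => x) false).Perm (m :: l.erase m) :=
      List.Perm.cons m (PySem.List.sorted_perm _ _ _)
    exact p1.trans (List.perm_cons_erase (PySem.List.min?_mem h)).symm
  · refine List.pairwise_cons.mpr ⟨?_, ?_⟩
    · intro y hy
      have : y ∈ l.erase m := (PySem.List.mem_sorted _ _ _ _).mp hy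
      exact PySem.List.min?_isMin h y (List.mem_of_mem_erase this)
    · exact PySem.List.sorted_pairwise _ _

theorem min_val_core (k : Nat) : ∀ (L R D : List Int), L.length ≤ k → L ≠ [] → R ≠ [] →
    min_val L R D = min_val_alt L R D := by
  induction k with
  | zero => intro L R D hk hL _; exact absurd (List.length_eq_zero_iff.mp (Nat.le_zero.mp hk)) hL
  | succ k ih =>
    intro L R D hk hL hR
    obtain ⟨m1, h1⟩ : ∃ m, PySem.List.min? L (fun x => x) = some m := by
      cases hm : PySem.List.min? L (fun x => x) with
      | none => rw [PySem.List.min?_eq_none_iff] at hm; exact absurd hm hL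
      | some m => exact ⟨m, rfl⟩
    obtain ⟨m2, h2⟩ : ∃ m, PySem.List.min? R (fun x => x) = some m := by
      cases hm : PySem.List.min? R (fun x => x) with
      | none => rw [PySem.List.min?_eq_none_iff] at hm; exact absurd hm hR
      | some m => exact ⟨m, rfl⟩
    have hm1 := PySem.List.min?_mem h1
    have hm2 := PySem.List.min?_mem h2
    have hLlen : (L.erase m1).length + 1 = L.length := by
      rw [List.length_erase_of_mem hm1]
      exact Nat.succ_pred_eq_of_pos (List.length_pos_iff.mpr hL)
    have hRlen : (R.erase m2).length + 1 = R.length := by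
      rw [List.length_erase_of_mem hm2]
      exact Nat.succ_pred_eq_of_pos (List.length_pos_iff.mpr hR)
    have hsL := sorted_min_cons L m1 h1
    have hsR := sorted_min_cons R m2 h2
    have hA : min_val L R D =
        (if L.erase m1 ≠ [] ∧ R.erase m2 ≠ [] then
           min_val (L.erase m1) (R.erase m2) (D ++ [|m1 - m2|])
         else D ++ [|m1 - m2|]) := by
      rw [min_val]; rw [h1, h2]
    have hB : min_val_alt L R D =
        D ++ [|m1 - m2|] ++ List.zipWith (fun a b => |a - b|)
          ((PySem.List.sorted (L.erase m1) (fun x => x) false).take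
            (min (L.erase m1).length (R.erase m2).length))
          ((PySem.List.sorted (R.erase m2) (fun x => x) false).take
            (min (L.erase m1).length (R.erase m2).length)) := by
      show D ++ _ = _
      rw [hsL, hsR]
      have hmin : min L.length R.length = min (L.erase m1).length (R.erase m2).length + 1 := by
        omega
      rw [hmin, List.take_succ_cons, List.take_succ_cons, List.zipWith_cons_cons,
        List.append_assoc, List.singleton_append]
    rw [hA]
    by_cases hc : L.erase m1 ≠ [] ∧ R.erase m2 ≠ []
    · rw [if_pos hc, ih _ _ _ (by omega) hc.1 hc.2, hB]
      show (D ++ [|m1 - m2|]) ++ _ = _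
      rfl
    · rw [if_neg hc, hB]
      have h0 : min (L.erase m1).length (R.erase m2).length = 0 := by
        rcases Decidable.not_and_iff_not_or_not.mp hc with h | h
        · have := List.eq_nil_iff_length_eq_zero.mp (not_not.mp h)
          omega
        · have := List.eq_nil_iff_length_eq_zero.mp (not_not.mp h)
          omega
      rw [h0]
      simp

-- ===== VERDICT (by name: the statement is the Claim_ definition above) =====
theorem min_val_spec : Claim_equal_min_val := by
  intro L R D _ hpre
  exact min_val_core L.length L R D le_rfl hpre.1 hpre.2
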